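-- pv_equiv track=rewrite | github.com/Nghia03092004/nghia03092004.github.io | project_euler_unified/problem_974/solution.py | linear_sieve_mobius
-- ===== SOURCE A (Python) =====
-- def linear_sieve_mobius(N):
--     """Compute mu[0..N] using a linear sieve. Returns (mu, primes)."""
--     mu = [0] * (N + 1)
--     mu[1] = 1
--     is_prime = [True] * (N + 1)
--     primes = []
--     for i in range(2, N + 1):
--         if is_prime[i]:
--             primes.append(i)
--             mu[i] = -1
--         for p in primes:
--             if i * p > N:
--                 break
--             is_prime[i * p] = False
--             if i % p == 0:
--                 mu[i * p] = 0
--                 break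
--             else:
--                 mu[i * p] = -mu[i]
--     return mu, primes
-- ===== SOURCE B (Python) =====
-- def linear_sieve_mobius(N):
--     """Compute mu[0..N] and the list of primes up to N.
--
--     Trial-division variant: for each n, find its smallest prime factor by
--     scanning the primes already found (stopping at sqrt(n)), then derive
--     mu[n] from mu[n // spf]. No is_prime array, no multiple-marking.
--     """
--     mu = [0] * (N + 1)
--     mu[1] = 1
--     primes = []
--     for n in range(2, N + 1):
--         spf = n
--         for p in primes:
--             if p * p > n:
--                 break
--             if n % p == 0:
--                 spf = p
--                 break
--         if spf == n:
--             primes.append(n)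
--         m = n // spf
--         mu[n] = 0 if m % spf == 0 else -mu[m]
--     return mu, primes
-- ===== Notes on version B (the rewrite author's own statement) =====
-- stated objective: alternative
-- what changed: Replaces the linear sieve (is_prime array, each composite marked once via prime multiples of i) by per-number trial division over the primes found so far (stopping at p*p > n) to get the smallest prime factor, deriving mu[n] from mu[n // spf]; no is_prime array and no multiple-marking.
import Mathlib
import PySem

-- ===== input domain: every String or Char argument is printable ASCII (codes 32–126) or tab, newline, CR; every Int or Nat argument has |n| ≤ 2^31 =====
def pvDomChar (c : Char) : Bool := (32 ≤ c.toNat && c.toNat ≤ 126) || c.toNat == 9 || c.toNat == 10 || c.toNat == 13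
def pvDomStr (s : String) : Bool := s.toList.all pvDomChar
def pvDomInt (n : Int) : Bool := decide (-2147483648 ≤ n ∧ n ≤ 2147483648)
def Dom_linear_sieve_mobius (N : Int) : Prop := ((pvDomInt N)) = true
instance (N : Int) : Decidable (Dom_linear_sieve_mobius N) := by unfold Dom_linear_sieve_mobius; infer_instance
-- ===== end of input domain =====

-- B replaces the linear sieve (is_prime array + marking multiples of each number)
-- by per-number trial division over the primes found so far; equal output, no speed claim.

-- ===== PORT A =====
-- inner `for p in primes:` loop of A (break returns the current state)
def lsInnerA (n i : Nat) (primes : List Nat) (mu : List Int) (ip : List Bool) :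
    List Int × List Bool :=
  match primes with
  | [] => (mu, ip)
  | p :: ps =>
    if n < i * p then (mu, ip)
    else
      let ip' := ip.set (i * p) false
      if i % p = 0 then (mu.set (i * p) 0, ip')
      else lsInnerA n i ps (mu.set (i * p) (-(mu.getD i 0))) ip'

-- body of A's outer loop for index i
def lsStepA (n : Nat) (st : List Int × List Bool × List Nat) (i : Nat) :
    List Int × List Bool × List Nat :=
  let mu := st.1
  let ip := st.2.1
  let primes := st.2.2
  let primes' := if ip.getD i true then primes ++ [i] else primes
  let mu' := if ip.getD i true then mu.set i (-1) else mu
  let r := lsInnerA n i primes' mu' ip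
  (r.1, r.2, primes')

-- Python raises IndexError on `mu[1] = 1` when N < 1 (excluded by Pre_); loop indices are
-- 2..N, nonnegative, so they are carried as Nat.
def linear_sieve_mobius (N : Int) : List Int × List Int :=
  if N < 1 then ([], []) else
    let n := N.toNat
    let mu := (List.replicate (n + 1) (0 : Int)).set 1 1
    let st := (List.range' 2 (n - 1)).foldl (lsStepA n) (mu, List.replicate (n + 1) true, [])
    (st.1, st.2.2.map (fun p => Int.ofNat p))

-- ===== PORT B =====
-- B's inner loop: smallest prime factor of n by trial division over the found primes
def spfFind (n : Nat) (primes : List Nat) : Nat :=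
  match primes with
  | [] => n
  | p :: ps =>
    if n < p * p then n
    else if n % p = 0 then p
    else spfFind n ps

-- body of B's loop for index k
def lsStepB (st : List Int × List Nat) (k : Nat) : List Int × List Nat :=
  let spf := spfFind k st.2
  let primes := if spf = k then st.2 ++ [k] else st.2
  let m := k / spf
  (st.1.set k (if m % spf = 0 then 0 else -(st.1.getD m 0)), primes)

def linear_sieve_mobius_alt (N : Int) : List Int × List Int :=
  if N < 1 then ([], []) else
    let n := N.toNat
    let mu := (List.replicate (n + 1) (0 : Int)).set 1 1
    let st := (List.range' 2 (n - 1)).foldl lsStepB (mu, [])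
    (st.1, st.2.map (fun p => Int.ofNat p))

-- ===== PRECONDITION & SPEC =====
-- Pre_ excludes exactly N ≤ 0, where Python A raises IndexError on `mu[1] = 1`.
def Pre_linear_sieve_mobius (N : Int) : Prop := 1 ≤ N
instance (N : Int) : Decidable (Pre_linear_sieve_mobius N) := by
  unfold Pre_linear_sieve_mobius; infer_instance
def pvWitness_linear_sieve_mobius : Int := 10

def Spec_linear_sieve_mobius (N : Int) (out : List Int × List Int) : Prop :=
  out = linear_sieve_mobius_alt N
instance (N : Int) (out : List Int × List Int) : Decidable (Spec_linear_sieve_mobius N out) := by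
  unfold Spec_linear_sieve_mobius; infer_instance

-- ===== CLAIM (what is proved, stated in full; the proofs are below) =====
def Claim_equal_linear_sieve_mobius : Prop :=
  ∀ (N : Int), Dom_linear_sieve_mobius N → Pre_linear_sieve_mobius N →
    Spec_linear_sieve_mobius N (linear_sieve_mobius N)

-- ===== LEMMAS AND PROOFS =====

-- the Möbius value both programs compute, via the least-prime-factor recurrence
def muSpec : Nat → Int
  | 0 => 0
  | 1 => 1
  | (k + 2) =>
    if (k + 2).minFac ∣ (k + 2) / (k + 2).minFac then 0
    else -muSpec ((k + 2) / (k + 2).minFac)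
decreasing_by
  exact Nat.div_lt_self (by omega) (Nat.minFac_prime (by omega)).two_le

lemma muSpec_eq {k : Nat} (hk : 2 ≤ k) :
    muSpec k = if k.minFac ∣ k / k.minFac then 0 else -muSpec (k / k.minFac) := by
  obtain ⟨m, rfl⟩ : ∃ m, k = m + 2 := ⟨k - 2, by omega⟩
  rw [muSpec]

lemma getD_set {α : Type} (l : List α) (i j : Nat) (v d : α) :
    (l.set i v).getD j d = if i = j ∧ j < l.length then v else l.getD j d := by
  simp only [List.getD, List.getElem?_set]
  split_ifs with h h2 h3 h4 <;> simp_all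

lemma getD_replicate {α : Type} (n j : Nat) (d v : α) :
    (List.replicate n v).getD j d = if j < n then v else d := by
  simp only [List.getD, List.getElem?_replicate]
  split_ifs <;> rfl

lemma getD_replicate_set (n j : Nat) :
    (((List.replicate (n + 1) (0 : Int)).set 1 1).getD j 0) =
      if j = 1 ∧ j < n + 1 then 1 else 0 := by
  rw [getD_set, List.length_replicate, getD_replicate]
  split_ifs with h1 h2 h3 <;> first | rfl | omega

lemma minFac_composite_lb {m : Nat} (h2 : 2 ≤ m) (hnp : ¬m.Prime) :
    m.minFac ≤ m / m.minFac := by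
  have hsq := Nat.minFac_sq_le_self (by omega) hnp
  have hdvd := Nat.minFac_dvd m
  have hpos : 0 < m.minFac := (Nat.minFac_prime (by omega)).pos
  refine (Nat.le_div_iff_mul_le hpos).2 ?_
  nlinarith [hsq]

lemma div_minFac_lt {m : Nat} (h2 : 2 ≤ m) : m / m.minFac < m :=
  Nat.div_lt_self (by omega) (Nat.minFac_prime (by omega)).two_le

lemma minFac_mul_prime {i p : Nat} (hi : 2 ≤ i) (hp : p.Prime) (hle : p ≤ i.minFac) :
    (i * p).minFac = p := by
  have h1 : (i * p).minFac ≤ p :=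
    Nat.minFac_le_of_dvd hp.two_le ⟨i, by ring⟩
  have hq : ((i * p).minFac).Prime :=
    Nat.minFac_prime (by nlinarith [hp.two_le])
  have h2 : p ≤ (i * p).minFac := by
    rcases (Nat.Prime.dvd_mul hq).1 (Nat.minFac_dvd (i * p)) with h | h
    · exact le_trans hle (Nat.minFac_le_of_dvd hq.two_le h)
    · exact le_of_eq ((Nat.prime_dvd_prime_iff_eq hq hp).1 h).symm
  omega

lemma not_prime_mul' {i p : Nat} (hi : 2 ≤ i) (hp : 2 ≤ p) : ¬(i * p).Prime := by
  intro h
  rcases h.eq_one_or_self_of_dvd i ⟨p, rfl⟩ with h1 | h1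
  · omega
  · nlinarith

-- written-cells predicate for A at the start of iteration i
abbrev WA (i m : Nat) : Prop :=
  m ≤ 1 ∨ (m.Prime ∧ m < i) ∨ (2 ≤ m ∧ ¬m.Prime ∧ m / m.minFac < i)

-- cells the inner loop of iteration i touches, with cursor a
abbrev UpdA (n i a m : Nat) : Prop :=
  (m / i).Prime ∧ a ≤ m / i ∧ m / i ≤ i.minFac ∧ m ≤ n ∧ m = i * (m / i)

def InvA (n i : Nat) (st : List Int × List Bool × List Nat) : Prop :=
  st.1.length = n + 1 ∧ st.2.1.length = n + 1 ∧
  (∀ m, m ≤ n → st.1.getD m 0 = if WA i m then muSpec m else 0) ∧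
  (∀ m, m ≤ n → st.2.1.getD m false
      = !decide (2 ≤ m ∧ ¬m.Prime ∧ m / m.minFac < i)) ∧
  st.2.2 = (List.range i).filter (fun m => decide m.Prime)

lemma UpdA_mul {n i a p : Nat} (hi : 2 ≤ i) (hp : 0 < p) :
    UpdA n i a (i * p) ↔ (p.Prime ∧ a ≤ p ∧ p ≤ i.minFac ∧ i * p ≤ n) := by
  have hd : i * p / i = p := Nat.mul_div_cancel_left p (by omega)
  unfold UpdA
  rw [hd]
  tauto

lemma UpdA_elim {n i a m : Nat} (h : UpdA n i a m) :
    ∃ p, p.Prime ∧ a ≤ p ∧ p ≤ i.minFac ∧ i * p ≤ n ∧ m = i * p := by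
  refine ⟨m / i, h.1, h.2.1, h.2.2.1, ?_, h.2.2.2.2⟩
  have := h.2.2.2.2
  omega

lemma UpdA_mono {n i a a' m : Nat} (ha : a ≤ a') (h : UpdA n i a' m) : UpdA n i a m :=
  ⟨h.1, le_trans ha h.2.1, h.2.2⟩

lemma innerA_spec (n i : Nat) (hi : 2 ≤ i) (hin : i ≤ n) :
    ∀ (L : List Nat) (a : Nat) (mu : List Int) (ip : List Bool),
      mu.length = n + 1 → ip.length = n + 1 →
      (∀ p, p ∈ L ↔ p.Prime ∧ a ≤ p ∧ p ≤ i) →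
      L.Pairwise (· < ·) →
      (∀ q, q.Prime → q ∣ i → a ≤ q) →
      (lsInnerA n i L mu ip).1.length = n + 1 ∧
      (lsInnerA n i L mu ip).2.length = n + 1 ∧
      (∀ m, m ≤ n →
        (lsInnerA n i L mu ip).1.getD m 0
          = if UpdA n i a m then (if (m / i) ∣ i then 0 else -(mu.getD i 0))
            else mu.getD m 0) ∧
      (∀ m, m ≤ n →
        (lsInnerA n i L mu ip).2.getD m false
          = if UpdA n i a m then false else ip.getD m false) := by
  intro L
  induction L with
  | nil =>
    intro a mu ip hmu hip hmem _ _
    have hnoU : ∀ m, ¬ UpdA n i a m := by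
      intro m h
      obtain ⟨p, hp, hap, hple, _, _⟩ := UpdA_elim h
      have : p ∈ ([] : List Nat) :=
        (hmem p).2 ⟨hp, hap, le_trans hple (Nat.minFac_le (by omega))⟩
      simp at this
    simp only [lsInnerA]
    refine ⟨hmu, hip, ?_, ?_⟩ <;> intro m _ <;> rw [if_neg (hnoU m)]
  | cons p ps IH =>
    intro a mu ip hmu hip hmem hpw hdiv
    have hpL := (hmem p).1 List.mem_cons_self
    obtain ⟨hp, hap, hpi⟩ := hpL
    have hlt : ∀ q ∈ ps, p < q := fun q hq => List.rel_of_pairwise_cons hpw hq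
    have hps : ps.Pairwise (· < ·) := hpw.of_cons
    have hlpfP : (i.minFac).Prime := Nat.minFac_prime (by omega)
    have hlpfa : a ≤ i.minFac := hdiv _ hlpfP (Nat.minFac_dvd i)
    have hlpfi : i.minFac ≤ i := Nat.minFac_le (by omega)
    have hlpfL : i.minFac ∈ p :: ps := (hmem _).2 ⟨hlpfP, hlpfa, hlpfi⟩
    have hplpf : p ≤ i.minFac := by
      rcases List.mem_cons.1 hlpfL with h | h
      · omega
      · exact le_of_lt (hlt _ h)
    by_cases hbrk : n < i * p
    · -- break: i * p > N
      have hnoU : ∀ m, ¬ UpdA n i a m := by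
        intro m h
        obtain ⟨p', hp', hap', hple', hpn', rfl⟩ := UpdA_elim h
        have hmem' : p' ∈ p :: ps :=
          (hmem p').2 ⟨hp', hap', le_trans hple' hlpfi⟩
        rcases List.mem_cons.1 hmem' with rfl | h'
        · omega
        · have h2 : p < p' := hlt _ h'
          nlinarith
      simp only [lsInnerA, if_pos hbrk]
      refine ⟨hmu, hip, ?_, ?_⟩ <;> intro m _ <;> rw [if_neg (hnoU m)]
    · push_neg at hbrk
      have hipn : i * p ≤ n := hbrk
      have hiplen : i * p < mu.length := by omega
      have hipne : i * p ≠ i := by have := hp.two_le; nlinarith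
      by_cases hmod : i % p = 0
      · -- p divides i: p = minFac i, write mu[i*p] := 0 and stop
        have hpd : p ∣ i := Nat.dvd_of_mod_eq_zero hmod
        have hpeq : p = i.minFac := by
          have h1 : i.minFac ≤ p := Nat.minFac_le_of_dvd hp.two_le hpd
          omega
        have hUiff : ∀ m, m ≤ n → (UpdA n i a m ↔ m = i * p) := by
          intro m _
          constructor
          · intro h
            obtain ⟨p', hp', hap', hple', hpn', rfl⟩ := UpdA_elim h
            have hmem' : p' ∈ p :: ps :=
              (hmem p').2 ⟨hp', hap', le_trans hple' hlpfi⟩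
            rcases List.mem_cons.1 hmem' with rfl | h'
            · rfl
            · have := hlt _ h'
              omega
          · rintro rfl
            exact (UpdA_mul hi hp.pos).2 ⟨hp, hap, by omega, hipn⟩
        simp only [lsInnerA, if_neg (by omega : ¬ n < i * p), if_pos hmod]
        refine ⟨by simpa using hmu, by simpa using hip, ?_, ?_⟩ <;> intro m hm
        · rw [getD_set, hmu]
          by_cases hU : UpdA n i a m
          · have hmip := (hUiff m hm).1 hU
            subst hmip
            rw [if_pos ⟨rfl, by omega⟩, if_pos hU,
              if_pos (by rw [Nat.mul_div_cancel_left p (by omega)]; exact hpd)]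
          · rw [if_neg (fun hc => hU ((hUiff m hm).2 hc.1.symm)), if_neg hU]
        · rw [getD_set, hip]
          by_cases hU : UpdA n i a m
          · have hmip := (hUiff m hm).1 hU
            subst hmip
            rw [if_pos ⟨rfl, by omega⟩, if_pos hU]
          · rw [if_neg (fun hc => hU ((hUiff m hm).2 hc.1.symm)), if_neg hU]
      · -- p does not divide i: write mu[i*p] := -mu[i] and continue
        have hnpd : ¬ p ∣ i := fun h => by
          obtain ⟨c, hc⟩ := h
          exact hmod (by rw [hc]; exact Nat.mul_mod_right p c)
        have hlpfne : i.minFac ≠ p := fun h => hnpd (h ▸ Nat.minFac_dvd i)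
        have hplpf' : p < i.minFac := by
          rcases List.mem_cons.1 hlpfL with h | h
          · omega
          · exact hlt _ h
        have IHspec := IH (p + 1) (mu.set (i * p) (-(mu.getD i 0))) (ip.set (i * p) false)
          (by simp [hmu]) (by simp [hip])
          (fun q => ⟨fun hq => ⟨((hmem q).1 (List.mem_cons_of_mem _ hq)).1,
              by have := hlt _ hq; omega,
              ((hmem q).1 (List.mem_cons_of_mem _ hq)).2.2⟩,
            fun hq => by
              rcases List.mem_cons.1 ((hmem q).2 ⟨hq.1, by omega, hq.2.2⟩) with rfl | h
              · omega
              · exact h⟩)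
          hps
          (fun q hq1 hq2 => by
            have hqi : q ≤ i := Nat.le_of_dvd (by omega) hq2
            have hqa : a ≤ q := hdiv q hq1 hq2
            rcases List.mem_cons.1 ((hmem q).2 ⟨hq1, hqa, hqi⟩) with rfl | h
            · exact absurd hq2 hnpd
            · have := hlt _ h; omega)
        obtain ⟨hL1, hL2, hm1, hm2⟩ := IHspec
        have hred : lsInnerA n i (p :: ps) mu ip
            = lsInnerA n i ps (mu.set (i * p) (-(mu.getD i 0))) (ip.set (i * p) false) := by
          simp only [lsInnerA, if_neg (by omega : ¬ n < i * p), if_neg hmod]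
        have hmu'i : (mu.set (i * p) (-(mu.getD i 0))).getD i 0 = mu.getD i 0 := by
          rw [getD_set, if_neg]; rintro ⟨h1, -⟩; exact hipne h1
        refine ⟨by rw [hred]; exact hL1, by rw [hred]; exact hL2, ?_, ?_⟩ <;> intro m hm
        · rw [hred, hm1 m hm]
          by_cases hU : UpdA n i (p + 1) m
          · have hUa : UpdA n i a m := UpdA_mono (by omega) hU
            rw [if_pos hU, if_pos hUa, hmu'i]
          · by_cases hmip : m = i * p
            · subst hmip
              have hUa : UpdA n i a (i * p) :=
                (UpdA_mul hi hp.pos).2 ⟨hp, hap, by omega, hipn⟩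
              rw [if_neg hU, if_pos hUa, getD_set, if_pos ⟨rfl, by omega⟩,
                if_neg (by rw [Nat.mul_div_cancel_left p (by omega)]; exact hnpd)]
            · have hUa : ¬ UpdA n i a m := by
                intro h
                obtain ⟨p', hp', hap', hple', hpn', rfl⟩ := UpdA_elim h
                have hmem' : p' ∈ p :: ps := (hmem p').2 ⟨hp', hap', le_trans hple' hlpfi⟩
                rcases List.mem_cons.1 hmem' with rfl | h'
                · exact hmip rfl
                · exact hU ((UpdA_mul hi hp'.pos).2
                    ⟨hp', by have := hlt _ h'; omega, hple', hpn'⟩)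
              rw [if_neg hU, if_neg hUa, getD_set, if_neg (fun hc => hmip hc.1.symm)]
        · rw [hred, hm2 m hm]
          by_cases hU : UpdA n i (p + 1) m
          · have hUa : UpdA n i a m := UpdA_mono (by omega) hU
            rw [if_pos hU, if_pos hUa]
          · by_cases hmip : m = i * p
            · subst hmip
              have hUa : UpdA n i a (i * p) :=
                (UpdA_mul hi hp.pos).2 ⟨hp, hap, by omega, hipn⟩
              rw [if_neg hU, if_pos hUa, getD_set, if_pos ⟨rfl, by omega⟩]
            · have hUa : ¬ UpdA n i a m := by
                intro h
                obtain ⟨p', hp', hap', hple', hpn', rfl⟩ := UpdA_elim h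
                have hmem' : p' ∈ p :: ps := (hmem p').2 ⟨hp', hap', le_trans hple' hlpfi⟩
                rcases List.mem_cons.1 hmem' with rfl | h'
                · exact hmip rfl
                · exact hU ((UpdA_mul hi hp'.pos).2
                    ⟨hp', by have := hlt _ h'; omega, hple', hpn'⟩)
              rw [if_neg hU, if_neg hUa, getD_set, if_neg (fun hc => hmip hc.1.symm)]


lemma getD_irrel {α : Type} (l : List α) (j : Nat) (d d' : α) (hj : j < l.length) :
    l.getD j d = l.getD j d' := by
  simp [List.getD, List.getElem?_eq_getElem hj]

lemma muSpec_prime {p : Nat} (hp : p.Prime) : muSpec p = -1 := by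
  rw [muSpec_eq hp.two_le, Nat.Prime.minFac_eq hp, Nat.div_self hp.pos]
  simp [muSpec, Nat.dvd_one, hp.ne_one]

lemma UpdA_char {n i : Nat} (hi : 2 ≤ i) {m : Nat} (hm : m ≤ n) :
    UpdA n i 2 m ↔ (2 ≤ m ∧ ¬m.Prime ∧ m / m.minFac = i) := by
  constructor
  · intro h
    obtain ⟨p, hp, h2p, hple, hpn, rfl⟩ := UpdA_elim h
    have hmf : (i * p).minFac = p := minFac_mul_prime hi hp hple
    refine ⟨by nlinarith [hp.two_le], not_prime_mul' hi hp.two_le, ?_⟩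
    rw [hmf, Nat.mul_div_cancel _ hp.pos]
  · rintro ⟨h2, hnp, hdiv⟩
    have hmfp : m.minFac.Prime := Nat.minFac_prime (by omega)
    have hmfd : m.minFac ∣ m := Nat.minFac_dvd m
    have hmeq : m = i * m.minFac := by
      conv_lhs => rw [← Nat.div_mul_cancel hmfd, hdiv]
    have hid : i ∣ m := by rw [← hdiv]; exact Nat.div_dvd_of_dvd hmfd
    have hiF : (i.minFac).Prime := Nat.minFac_prime (by omega)
    have hple : m.minFac ≤ i.minFac :=
      Nat.minFac_le_of_dvd hiF.two_le ((Nat.minFac_dvd i).trans hid)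
    rw [hmeq]
    exact (UpdA_mul hi hmfp.pos).2 ⟨hmfp, hmfp.two_le, hple, by omega⟩

lemma muSpec_of_UpdA {n i m : Nat} (hi : 2 ≤ i) (hm : m ≤ n) (h : UpdA n i 2 m) :
    muSpec m = if (m / i) ∣ i then 0 else -muSpec i := by
  obtain ⟨p, hp, h2p, hple, hpn, rfl⟩ := UpdA_elim h
  have hmf : (i * p).minFac = p := minFac_mul_prime hi hp hple
  have hdiv : i * p / i = p := Nat.mul_div_cancel_left p (by omega)
  rw [muSpec_eq (by nlinarith [hp.two_le]), hmf, hdiv, Nat.mul_div_cancel _ hp.pos]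

set_option maxHeartbeats 1000000 in
lemma stepA_inv (n i : Nat) (hi : 2 ≤ i) (hin : i ≤ n) (st : List Int × List Bool × List Nat)
    (h : InvA n i st) : InvA n (i + 1) (lsStepA n st i) := by
  obtain ⟨hlen1, hlen2, hmu, hip, hpr⟩ := h
  have hb : st.2.1.getD i true = decide i.Prime := by
    rw [getD_irrel _ _ _ false (by omega), hip i hin]
    by_cases hp : i.Prime
    · simp [hp]
    · have := div_minFac_lt (m := i) hi
      simp [hp, hi, this]
  -- the state after the `if is_prime[i]` block
  have hmuL : (if st.2.1.getD i true then st.1.set i (-1) else st.1).length = n + 1 := by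
    split <;> simp [hlen1]
  have hmuchar : ∀ m, m ≤ n →
      (if st.2.1.getD i true then st.1.set i (-1) else st.1).getD m 0
        = if WA i m ∨ (m = i ∧ i.Prime) then muSpec m else 0 := by
    intro m hm
    rw [hb]
    by_cases hp : i.Prime
    · have hdp : decide i.Prime = true := by simp [hp]
      rw [hdp, if_pos rfl, getD_set]
      by_cases hmi : m = i
      · subst hmi
        rw [if_pos ⟨rfl, by omega⟩, if_pos (Or.inr ⟨rfl, hp⟩), muSpec_prime hp]
      · rw [if_neg (fun hc => hmi hc.1.symm), hmu m hm]
        have : (WA i m ∨ m = i ∧ i.Prime) ↔ WA i m := by tauto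
        rw [if_congr this rfl rfl]
    · have hdp : decide i.Prime = false := by simp [hp]
      rw [hdp, if_neg (by simp), hmu m hm]
      have : (WA i m ∨ m = i ∧ i.Prime) ↔ WA i m := by tauto
      rw [if_congr this rfl rfl]
  have hprimes : (if st.2.1.getD i true then st.2.2 ++ [i] else st.2.2)
      = (List.range (i + 1)).filter (fun m => decide m.Prime) := by
    rw [hb, List.range_succ, List.filter_append, hpr]
    by_cases hp : i.Prime <;> simp [hp]
  have hmem : ∀ p, p ∈ (if st.2.1.getD i true then st.2.2 ++ [i] else st.2.2)
      ↔ p.Prime ∧ 2 ≤ p ∧ p ≤ i := by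
    intro p
    rw [hprimes]
    simp only [List.mem_filter, List.mem_range, decide_eq_true_eq]
    constructor
    · rintro ⟨h1, h2⟩; exact ⟨h2, h2.two_le, by omega⟩
    · rintro ⟨h1, h2, h3⟩; exact ⟨by omega, h1⟩
  have hpw : (if st.2.1.getD i true then st.2.2 ++ [i] else st.2.2).Pairwise (· < ·) := by
    rw [hprimes]
    exact (List.pairwise_lt_range).filter _
  have hinner := innerA_spec n i hi hin
    (if st.2.1.getD i true then st.2.2 ++ [i] else st.2.2) 2
    (if st.2.1.getD i true then st.1.set i (-1) else st.1) st.2.1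
    hmuL hlen2 hmem hpw (fun q hq _ => hq.two_le)
  obtain ⟨hR1, hR2, hRmu, hRip⟩ := hinner
  have hmui : (if st.2.1.getD i true then st.1.set i (-1) else st.1).getD i 0 = muSpec i := by
    rw [hmuchar i hin, if_pos]
    by_cases hp : i.Prime
    · exact Or.inr ⟨rfl, hp⟩
    · exact Or.inl (Or.inr (Or.inr ⟨hi, hp, div_minFac_lt hi⟩))
  have hstep : lsStepA n st i
      = ((lsInnerA n i (if st.2.1.getD i true then st.2.2 ++ [i] else st.2.2)
            (if st.2.1.getD i true then st.1.set i (-1) else st.1) st.2.1).1,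
         (lsInnerA n i (if st.2.1.getD i true then st.2.2 ++ [i] else st.2.2)
            (if st.2.1.getD i true then st.1.set i (-1) else st.1) st.2.1).2,
         (if st.2.1.getD i true then st.2.2 ++ [i] else st.2.2)) := rfl
  have hWA_succ : ∀ m, m ≤ n →
      (WA (i + 1) m ↔ ((WA i m ∨ (m = i ∧ i.Prime)) ∨ UpdA n i 2 m)) := by
    intro m hm
    rw [UpdA_char hi hm]
    unfold WA
    constructor
    · rintro (h1 | ⟨h2, h3⟩ | ⟨h4, h5, h6⟩)
      · exact Or.inl (Or.inl (Or.inl h1))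
      · by_cases hmi : m = i
        · exact Or.inl (Or.inr ⟨hmi, hmi ▸ h2⟩)
        · exact Or.inl (Or.inl (Or.inr (Or.inl ⟨h2, by omega⟩)))
      · by_cases hlt : m / m.minFac < i
        · exact Or.inl (Or.inl (Or.inr (Or.inr ⟨h4, h5, hlt⟩)))
        · exact Or.inr ⟨h4, h5, by omega⟩
    · rintro (((h1 | ⟨h2, h3⟩ | ⟨h4, h5, h6⟩) | ⟨rfl, hp⟩) | ⟨h7, h8, h9⟩)
      · exact Or.inl h1
      · exact Or.inr (Or.inl ⟨h2, by omega⟩)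
      · exact Or.inr (Or.inr ⟨h4, h5, by omega⟩)
      · exact Or.inr (Or.inl ⟨hp, by omega⟩)
      · exact Or.inr (Or.inr ⟨h7, h8, by omega⟩)
  rw [hstep]
  refine ⟨hR1, hR2, ?_, ?_, hprimes⟩
  · intro m hm
    rw [hRmu m hm]
    by_cases hU : UpdA n i 2 m
    · rw [if_pos hU, hmui, if_pos ((hWA_succ m hm).2 (Or.inr hU)),
        muSpec_of_UpdA hi hm hU]
    · rw [if_neg hU, hmuchar m hm]
      have h2 : WA (i + 1) m ↔ (WA i m ∨ (m = i ∧ i.Prime)) :=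
        ⟨fun h => ((hWA_succ m hm).1 h).resolve_right hU,
         fun h => (hWA_succ m hm).2 (Or.inl h)⟩
      exact (if_congr h2.symm rfl rfl)
  · intro m hm
    rw [hRip m hm]
    by_cases hU : UpdA n i 2 m
    · rw [if_pos hU]
      have := (UpdA_char hi hm).1 hU
      have hcond : (2 ≤ m ∧ ¬m.Prime ∧ m / m.minFac < i + 1) := ⟨this.1, this.2.1, by omega⟩
      simp [hcond]
    · rw [if_neg hU, hip m hm]
      have := (UpdA_char hi hm).not.1 hU
      have hiff : (2 ≤ m ∧ ¬m.Prime ∧ m / m.minFac < i + 1)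
          ↔ (2 ≤ m ∧ ¬m.Prime ∧ m / m.minFac < i) := by
        constructor
        · rintro ⟨a1, a2, a3⟩
          refine ⟨a1, a2, ?_⟩
          by_cases he : m / m.minFac = i
          · exact absurd ⟨a1, a2, he⟩ this
          · omega
        · rintro ⟨a1, a2, a3⟩; exact ⟨a1, a2, by omega⟩
      exact congrArg (fun b => !b) (decide_eq_decide.2 hiff.symm)

lemma mod_eq_zero_iff_dvd' {p m : Nat} : m % p = 0 ↔ p ∣ m :=
  ⟨Nat.dvd_of_mod_eq_zero, fun h => by
    obtain ⟨c, hc⟩ := h; rw [hc]; exact Nat.mul_mod_right p c⟩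

lemma WA_two {m : Nat} : WA 2 m ↔ m ≤ 1 := by
  constructor
  · rintro (h | ⟨hp, h2⟩ | ⟨h2, hnp, hlt⟩)
    · exact h
    · have := hp.two_le; omega
    · have := minFac_composite_lb h2 hnp
      have h2f : 2 ≤ m.minFac := (Nat.minFac_prime (by omega : m ≠ 1)).two_le
      omega
  · exact Or.inl

lemma initA_inv (n : Nat) (hn : 1 ≤ n) :
    InvA n 2 (((List.replicate (n + 1) (0 : Int)).set 1 1), List.replicate (n + 1) true, []) := by
  refine ⟨by simp, by simp, ?_, ?_,
    by rw [show List.filter (fun m => decide (Nat.Prime m)) (List.range 2) = ([] : List Nat)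
      from by decide]⟩
  · intro m hm
    rw [getD_replicate_set]
    by_cases h1 : m ≤ 1
    · rw [if_pos (WA_two.2 h1)]
      interval_cases m
      · rw [if_neg (show ¬(0 = 1 ∧ 0 < n + 1) by omega)]; simp [muSpec]
      · rw [if_pos (show 1 = 1 ∧ 1 < n + 1 by omega)]; simp [muSpec]
    · rw [if_neg (fun h => h1 (WA_two.1 h)),
        if_neg (show ¬(m = 1 ∧ m < n + 1) by omega)]
  · intro m hm
    rw [getD_replicate, if_pos (by omega)]
    have hc : ¬(2 ≤ m ∧ ¬m.Prime ∧ m / m.minFac < 2) := by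
      rintro ⟨h2, hnp, hlt⟩
      have := minFac_composite_lb h2 hnp
      have h2f : 2 ≤ m.minFac := (Nat.minFac_prime (by omega : m ≠ 1)).two_le
      omega
    rw [decide_eq_false hc]
    rfl

lemma foldA_inv (n : Nat) (hn : 1 ≤ n) :
    InvA n (n + 1)
      ((List.range' 2 (n - 1)).foldl (lsStepA n)
        (((List.replicate (n + 1) (0 : Int)).set 1 1), List.replicate (n + 1) true, [])) := by
  suffices h : ∀ j, j ≤ n - 1 → InvA n (2 + j)
      ((List.range' 2 j).foldl (lsStepA n)
        (((List.replicate (n + 1) (0 : Int)).set 1 1), List.replicate (n + 1) true, [])) by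
    have h2 := h (n - 1) le_rfl
    have he : 2 + (n - 1) = n + 1 := by omega
    rwa [he] at h2
  intro j
  induction j with
  | zero => intro _; simpa using initA_inv n hn
  | succ j ih =>
    intro hj
    rw [List.range'_concat, List.foldl_append]
    have hs := stepA_inv n (2 + j) (by omega) (by omega) _ (ih (by omega))
    have he : 2 + (j + 1) = (2 + j) + 1 := by omega
    rw [he]
    simpa using hs

-- ===== B side =====

def InvB (n k : Nat) (st : List Int × List Nat) : Prop :=
  st.1.length = n + 1 ∧
  (∀ m, m ≤ n → st.1.getD m 0 = if m < k then muSpec m else 0) ∧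
  st.2 = (List.range k).filter (fun m => decide m.Prime)

lemma spfFind_spec (k : Nat) (hk : 2 ≤ k) :
    ∀ (L : List Nat) (a : Nat),
      (∀ p, p ∈ L ↔ p.Prime ∧ a ≤ p ∧ p < k) →
      L.Pairwise (· < ·) →
      (∀ q, q.Prime → q ∣ k → q ≠ k → a ≤ q) →
      spfFind k L = k.minFac := by
  intro L
  induction L with
  | nil =>
    intro a hmem _ hdiv
    have hkp : k.Prime := by
      by_contra hnp
      have h1 : k.minFac ≠ k := fun h => hnp (Nat.prime_def_minFac.2 ⟨hk, h⟩)
      have h2 : k.minFac < k := lt_of_le_of_ne (Nat.minFac_le (by omega)) h1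
      have h3 : k.minFac.Prime := Nat.minFac_prime (by omega)
      have := (hmem k.minFac).2 ⟨h3, hdiv _ h3 (Nat.minFac_dvd k) h1, h2⟩
      simp at this
    rw [Nat.Prime.minFac_eq hkp]
    rfl
  | cons p ps IH =>
    intro a hmem hpw hdiv
    obtain ⟨hp, hap, hpk⟩ := (hmem p).1 List.mem_cons_self
    have hlt : ∀ q ∈ ps, p < q := fun q hq => List.rel_of_pairwise_cons hpw hq
    by_cases hsq : k < p * p
    · have hkp : k.Prime := by
        by_contra hnp
        have h3 : k.minFac.Prime := Nat.minFac_prime (by omega)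
        have hsqle : k.minFac * k.minFac ≤ k := by
          have h4 := Nat.minFac_sq_le_self (by omega : 0 < k) hnp
          nlinarith [h4]
        have h1 : k.minFac ≠ k := by
          intro h; rw [h] at hsqle; nlinarith
        have h2 : k.minFac < k := lt_of_le_of_ne (Nat.minFac_le (by omega)) h1
        have hmemF : k.minFac ∈ p :: ps :=
          (hmem _).2 ⟨h3, hdiv _ h3 (Nat.minFac_dvd k) h1, h2⟩
        have hge : p ≤ k.minFac := by
          rcases List.mem_cons.1 hmemF with h | h
          · omega
          · exact (hlt _ h).le
        nlinarith
      rw [Nat.Prime.minFac_eq hkp]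
      simp [spfFind, hsq]
    · by_cases hmod : k % p = 0
      · have hpd : p ∣ k := Nat.dvd_of_mod_eq_zero hmod
        have hFle : k.minFac ≤ p := Nat.minFac_le_of_dvd hp.two_le hpd
        have h3 : k.minFac.Prime := Nat.minFac_prime (by omega)
        have h1 : k.minFac ≠ k := by omega
        have hmemF : k.minFac ∈ p :: ps :=
          (hmem _).2 ⟨h3, hdiv _ h3 (Nat.minFac_dvd k) h1, by omega⟩
        have hge : p ≤ k.minFac := by
          rcases List.mem_cons.1 hmemF with h | h
          · omega
          · exact (hlt _ h).le
        have hpe : p = k.minFac := by omega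
        rw [← hpe]
        simp [spfFind, hsq, hmod]
      · have hnpd : ¬ p ∣ k := fun h => by
          obtain ⟨c, hc⟩ := h
          exact hmod (by rw [hc]; exact Nat.mul_mod_right p c)
        have hred : spfFind k (p :: ps) = spfFind k ps := by
          simp [spfFind, hsq, hmod]
        rw [hred]
        refine IH (p + 1) (fun q => ⟨fun hq => ?_, fun hq => ?_⟩) hpw.of_cons
          (fun q hq1 hq2 hq3 => ?_)
        · obtain ⟨a1, a2, a3⟩ := (hmem q).1 (List.mem_cons_of_mem _ hq)
          exact ⟨a1, by have := hlt _ hq; omega, a3⟩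
        · rcases List.mem_cons.1 ((hmem q).2 ⟨hq.1, by omega, hq.2.2⟩) with rfl | h
          · omega
          · exact h
        · have hqk : q < k := lt_of_le_of_ne (Nat.le_of_dvd (by omega) hq2) hq3
          have hqa : a ≤ q := hdiv q hq1 hq2 hq3
          rcases List.mem_cons.1 ((hmem q).2 ⟨hq1, hqa, hqk⟩) with rfl | h
          · exact absurd hq2 hnpd
          · have := hlt _ h; omega

lemma stepB_inv (n k : Nat) (hk : 2 ≤ k) (hkn : k ≤ n) (st : List Int × List Nat)
    (h : InvB n k st) : InvB n (k + 1) (lsStepB st k) := by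
  obtain ⟨hlen, hmu, hpr⟩ := h
  have hspf : spfFind k st.2 = k.minFac := by
    refine spfFind_spec k hk st.2 2 (fun p => ?_) ?_ (fun q hq _ _ => hq.two_le)
    · rw [hpr]
      simp only [List.mem_filter, List.mem_range, decide_eq_true_eq]
      exact ⟨fun h => ⟨h.2, h.2.two_le, h.1⟩, fun h => ⟨h.2.2, h.1⟩⟩
    · rw [hpr]
      exact (List.pairwise_lt_range).filter _
  have hFp : k.minFac.Prime := Nat.minFac_prime (by omega)
  have hmlt : k / k.minFac < k := div_minFac_lt hk
  have hmu_m : st.1.getD (k / k.minFac) 0 = muSpec (k / k.minFac) := by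
    rw [hmu _ (by omega), if_pos (by omega)]
  refine ⟨by simp [lsStepB, hlen], ?_, ?_⟩
  · intro m hm
    simp only [lsStepB, hspf]
    rw [getD_set]
    by_cases hmk : m = k
    · subst hmk
      rw [if_pos ⟨rfl, by rw [hlen]; omega⟩, if_pos (Nat.lt_succ_self _),
        muSpec_eq hk, hmu_m]
      by_cases hd : m.minFac ∣ m / m.minFac
      · rw [if_pos (mod_eq_zero_iff_dvd'.2 hd), if_pos hd]
      · rw [if_neg (fun hc => hd (mod_eq_zero_iff_dvd'.1 hc)), if_neg hd]
    · rw [if_neg (fun hc => hmk hc.1.symm), hmu m hm]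
      exact if_congr (by omega) rfl rfl
  · simp only [lsStepB, hspf]
    rw [hpr, List.range_succ, List.filter_append]
    by_cases hkp : k.Prime
    · rw [if_pos (Nat.Prime.minFac_eq hkp)]
      simp [hkp]
    · rw [if_neg (fun h => hkp (Nat.prime_def_minFac.2 ⟨hk, h⟩))]
      simp [hkp]

lemma initB_inv (n : Nat) (hn : 1 ≤ n) :
    InvB n 2 (((List.replicate (n + 1) (0 : Int)).set 1 1), []) := by
  refine ⟨by simp, ?_,
    by rw [show List.filter (fun m => decide (Nat.Prime m)) (List.range 2) = ([] : List Nat)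
      from by decide]⟩
  intro m hm
  rw [getD_replicate_set]
  by_cases h1 : m ≤ 1
  · interval_cases m
    · rw [if_neg (show ¬(0 = 1 ∧ 0 < n + 1) by omega), if_pos (show 0 < 2 by omega)]
      simp [muSpec]
    · rw [if_pos (show 1 = 1 ∧ 1 < n + 1 by omega), if_pos (show 1 < 2 by omega)]
      simp [muSpec]
  · rw [if_neg (show ¬(m = 1 ∧ m < n + 1) by omega), if_neg (show ¬ m < 2 by omega)]

lemma foldB_inv (n : Nat) (hn : 1 ≤ n) :
    InvB n (n + 1)
      ((List.range' 2 (n - 1)).foldl lsStepB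
        (((List.replicate (n + 1) (0 : Int)).set 1 1), [])) := by
  suffices h : ∀ j, j ≤ n - 1 → InvB n (2 + j)
      ((List.range' 2 j).foldl lsStepB
        (((List.replicate (n + 1) (0 : Int)).set 1 1), [])) by
    have h2 := h (n - 1) le_rfl
    have he : 2 + (n - 1) = n + 1 := by omega
    rwa [he] at h2
  intro j
  induction j with
  | zero => intro _; simpa using initB_inv n hn
  | succ j ih =>
    intro hj
    rw [List.range'_concat, List.foldl_append]
    have hs := stepB_inv n (2 + j) (by omega) (by omega) _ (ih (by omega))
    have he : 2 + (j + 1) = (2 + j) + 1 := by omega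
    rw [he]
    simpa using hs

-- ===== assembling =====

lemma WA_final {n m : Nat} (hm : m ≤ n) : WA (n + 1) m := by
  by_cases h1 : m ≤ 1
  · exact Or.inl h1
  by_cases hp : m.Prime
  · exact Or.inr (Or.inl ⟨hp, by omega⟩)
  · exact Or.inr (Or.inr ⟨by omega, hp, by
      have := div_minFac_lt (m := m) (by omega); omega⟩)

lemma list_eq_of_getD {l₁ l₂ : List Int} (h₁ : l₁.length = l₂.length)
    (h : ∀ m, m < l₁.length → l₁.getD m 0 = l₂.getD m 0) : l₁ = l₂ := by
  apply List.ext_getElem h₁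
  intro m hm hm2
  have := h m hm
  simpa [List.getD, List.getElem?_eq_getElem, hm, hm2] using this

theorem linear_sieve_mobius_spec : Claim_equal_linear_sieve_mobius := by
  intro N _ hpre
  have hN : ¬ N < 1 := by unfold Pre_linear_sieve_mobius at hpre; omega
  unfold Spec_linear_sieve_mobius linear_sieve_mobius linear_sieve_mobius_alt
  rw [if_neg hN, if_neg hN]
  have hn : 1 ≤ N.toNat := by omega
  obtain ⟨hA1, hA2, hAmu, hAip, hApr⟩ := foldA_inv N.toNat hn
  obtain ⟨hB1, hBmu, hBpr⟩ := foldB_inv N.toNat hn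
  refine Prod.ext ?_ ?_
  · refine list_eq_of_getD (by rw [hA1, hB1]) ?_
    intro m hm
    rw [hA1] at hm
    rw [hAmu m (by omega), hBmu m (by omega),
      if_pos (WA_final (by omega)), if_pos (by omega)]
  · exact congrArg (fun l => List.map (fun p => Int.ofNat p) l)
      (hApr.trans hBpr.symm)
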